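-- pv_equiv track=rewrite | github.com/JeonJe/Algorithm | 프로그래머스/lv2/17687. ［3차］ n진수 게임/［3차］ n진수 게임.py | solution
-- ===== SOURCE A (Python) =====
-- def convert(n, base):
--     temp = "0123456789ABCDEF"
--     q, r = divmod(n, base)
--
--     if q == 0:
--         return temp[r]
--     else:
--         return convert(q, base) + temp[r]
--
-- def solution(n, t, m, p):
--     answer = ''
--     temp =''
--     for i in range(m*t):
--         temp += convert(i,n)
--
--     while len(answer) < t:
--         answer += temp[p-1]
--         p += m
--
--     return answer
-- ===== SOURCE B (Python) =====
-- def solution(n, t, m, p):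
--     digits = "0123456789ABCDEF"
--     answer = []
--     target = (p - 1) % m
--     pos = 0
--     i = 0
--     while len(answer) < t:
--         ds = []
--         x = i
--         while True:
--             x, r = divmod(x, n)
--             ds.append(digits[r])
--             if x == 0:
--                 break
--         for c in reversed(ds):
--             if len(answer) < t and pos % m == target:
--                 answer.append(c)
--             pos += 1
--         i += 1
--     return ''.join(answer)
-- ===== Notes on version B (the rewrite author's own statement) =====
-- stated objective: faster
-- what changed: A concatenates the base-n digits of all m*t numbers into one big string and then strides through it by index; B never builds that string: it generates numbers one by one (iterative divmod instead of A's recursion), walks their digits with a global position counter, keeps a digit exactly when pos % m == (p-1) % m, and stops as soon as t digits are collected.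
-- outside the precondition, e.g. on solution(20, 1, 1, 1): A returns '0', B returns '0'; on solution(2, 3, 1, 2): A returns '110', B returns '011'; on solution(2, 2, 2, 0): A returns '11', B returns '10'
import Mathlib
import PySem

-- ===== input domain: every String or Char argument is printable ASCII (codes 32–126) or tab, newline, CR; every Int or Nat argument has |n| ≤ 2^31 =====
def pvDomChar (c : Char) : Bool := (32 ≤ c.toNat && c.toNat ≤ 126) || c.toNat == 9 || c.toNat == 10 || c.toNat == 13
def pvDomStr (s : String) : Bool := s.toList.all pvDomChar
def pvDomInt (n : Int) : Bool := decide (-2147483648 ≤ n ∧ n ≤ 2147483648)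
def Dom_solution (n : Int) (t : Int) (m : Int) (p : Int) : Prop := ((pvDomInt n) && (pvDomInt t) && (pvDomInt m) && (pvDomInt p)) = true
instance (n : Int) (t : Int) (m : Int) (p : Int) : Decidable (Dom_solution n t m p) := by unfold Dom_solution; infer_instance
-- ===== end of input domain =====

-- B replaces A's "build the whole m*t-number digit string, then stride through it" by a
-- generate-and-filter pass (iterative divmod digits, a global position counter, a modular test,
-- early stop after t picks), intended to do less digit work. Return-value equivalence only.

-- ===== PORT A =====
-- A's hex table "0123456789ABCDEF" (as a char list; string facts are proved on the list side)
def hexA : List Char := ['0','1','2','3','4','5','6','7','8','9','A','B','C','D','E','F']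

-- convert(n, base): recursion guarded by fuel (call sites pass enough for base ≥ 2);
-- divmod?/pyGet? return none exactly where Python raises — those inputs are outside Pre_.
def convA : Nat → Int → Int → List Char
  | 0, _, _ => []
  | fuel+1, x, base =>
    match PySem.Int.divmod? x base with
    | none => []
    | some qr =>
      match PySem.List.pyGet? hexA qr.2 with
      | none => []
      | some c => if qr.1 = 0 then [c] else convA fuel qr.1 base ++ [c]

-- the while loop: one char is appended per iteration, so fuel t.toNat is exact under Pre_
def loopA (t mI : Int) (temp : List Char) : Nat → List Char → Int → List Char
  | 0, answer, _ => answer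
  | fuel+1, answer, p =>
    if (answer.length : Int) < t then
      match PySem.List.pyGet? temp (p - 1) with
      | none => answer
      | some c => loopA t mI temp fuel (answer ++ [c]) (p + mI)
    else answer

def solution (n : Int) (t : Int) (m : Int) (p : Int) : String :=
  let temp := (PySem.List.pyRange 0 (m * t) 1).foldl (fun acc i => acc ++ convA (i.toNat + 1) i n) []
  String.ofList (loopA t m temp t.toNat [] p)

-- ===== PORT B =====
def hexB : List Char := ['0','1','2','3','4','5','6','7','8','9','A','B','C','D','E','F']

-- B's inner `while True: x, r = divmod(x, n); ds.append(digits[r]); if x == 0: break`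
def digsB : Nat → Int → Int → List Char → List Char
  | 0, _, _, ds => ds
  | fuel+1, x, base, ds =>
    match PySem.Int.divmod? x base with
    | none => ds
    | some qr =>
      match PySem.List.pyGet? hexB qr.2 with
      | none => ds
      | some c => if qr.1 = 0 then ds ++ [c] else digsB fuel qr.1 base (ds ++ [c])

-- B's `for c in reversed(ds)` body: advance pos, pick c when pos ≡ target and answer not full
def stepB (t mI target : Int) (st : Int × List Char) (c : Char) : Int × List Char :=
  (st.1 + 1, if (st.2.length : Int) < t ∧ PySem.Int.mod st.1 mI = target then st.2 ++ [c] else st.2)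

-- B's outer while; each number yields ≥ 1 digit, so fuel (m*t).natAbs is enough under Pre_
def outerB (nI t mI target : Int) : Nat → Int → Int → List Char → List Char
  | 0, _, _, answer => answer
  | fuel+1, i, pos, answer =>
    if (answer.length : Int) < t then
      let st := ((digsB (i.toNat + 1) i nI []).reverse).foldl (stepB t mI target) (pos, answer)
      outerB nI t mI target fuel (i + 1) st.1 st.2
    else answer

def solution_alt (n : Int) (t : Int) (m : Int) (p : Int) : String :=
  String.ofList (outerB n t m (PySem.Int.mod (p - 1) m) (m * t).natAbs 0 0 [])

-- ===== PRECONDITION & SPEC =====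
-- Pre_ keeps the problem's natural domain (base 2..16, t,m ≥ 1, player 1 ≤ p ≤ m) plus the trivial
-- region t ≤ 0 (both programs return '' there, provided A's temp-building loop cannot raise:
-- m*t ≤ 0 makes it empty, and 2 ≤ |n| ≤ 16 keeps convert terminating with indices in range).
-- Excluded inputs on which A still returns: n outside 2..16 with few enough digits needed (A emits
-- hex digits for an unsupported base), p outside 1..m (A's value is an accident of negative-index
-- wraparound or of surplus digits in temp), and m = 0 with t ≤ 0 (A returns '' but B's modulus
-- (p-1) % m raises ZeroDivisionError).
def Pre_solution (n : Int) (t : Int) (m : Int) (p : Int) : Prop :=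
  (2 ≤ n ∧ n ≤ 16 ∧ 1 ≤ t ∧ 1 ≤ m ∧ 1 ≤ p ∧ p ≤ m) ∨
  (t ≤ 0 ∧ m ≠ 0 ∧ (m * t ≤ 0 ∨ 2 ≤ |n| ∧ |n| ≤ 16))
instance (n : Int) (t : Int) (m : Int) (p : Int) : Decidable (Pre_solution n t m p) := by
  unfold Pre_solution; infer_instance

def pvWitness_solution : Int × Int × Int × Int := (2, 4, 2, 1)

def Spec_solution (n : Int) (t : Int) (m : Int) (p : Int) (out : String) : Prop := out = solution_alt n t m p
instance (n : Int) (t : Int) (m : Int) (p : Int) (out : String) : Decidable (Spec_solution n t m p out) := by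
  unfold Spec_solution; infer_instance

-- ===== CLAIM (what is proved, stated in full; the proofs are below) =====
def Claim_equal_solution : Prop := ∀ (n : Int) (t : Int) (m : Int) (p : Int), Dom_solution n t m p → Pre_solution n t m p → Spec_solution n t m p (solution n t m p)

-- ===== LEMMAS AND PROOFS =====

lemma hexB_eq : hexB = hexA := rfl

-- B's little-endian digit accumulator is A's recursive conversion, reversed
lemma digsB_eq_convA : ∀ (fuel : Nat) (x base : Int) (ds : List Char),
    digsB fuel x base ds = ds ++ (convA fuel x base).reverse := by
  intro fuel
  induction fuel with
  | zero => intro x base ds; simp [digsB, convA]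
  | succ f ih =>
    intro x base ds
    rw [digsB, convA, hexB_eq]
    cases h : PySem.Int.divmod? x base with
    | none => simp
    | some qr =>
      cases hg : PySem.List.pyGet? hexA qr.2 with
      | none => simp [hg]
      | some c =>
        by_cases hq : qr.1 = 0 <;> simp [hg, hq, ih]

-- one unfolding shows convert never returns the empty string on the real domain
lemma convA_ne_nil (fuel : Nat) (x nI : Int) (h2 : 2 ≤ nI) (h16 : nI ≤ 16) :
    convA (fuel + 1) x nI ≠ [] := by
  rw [convA]
  have hne : nI ≠ 0 := by omega
  have hdm : PySem.Int.divmod? x nI = some (PySem.Int.floordiv x nI, PySem.Int.mod x nI) := by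
    simp [PySem.Int.divmod?, PySem.Int.floordiv, PySem.Int.mod, hne]
  have h0 : 0 ≤ PySem.Int.mod x nI := PySem.Int.mod_nonneg x (by omega)
  have h1 : PySem.Int.mod x nI < nI := PySem.Int.mod_lt x (by omega)
  have hcast : PySem.Int.mod x nI = ((PySem.Int.mod x nI).toNat : Int) := by omega
  have hlt : (PySem.Int.mod x nI).toNat < hexA.length := by simp [hexA]; omega
  have hg : PySem.List.pyGet? hexA (PySem.Int.mod x nI) = some (hexA[(PySem.Int.mod x nI).toNat]) := by
    conv_lhs => rw [hcast]
    rw [PySem.List.pyGet?_natCast, List.getElem?_eq_getElem hlt]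
  simp only [hdm, hg]
  by_cases hq : PySem.Int.floordiv x nI = 0 <;> simp [hq]

-- A's while loop is a strided map over temp (all touched indices in range)
lemma loopA_spec (t mI : Int) (temp : List Char) :
    ∀ (fuel : Nat) (ans : List Char) (p' : Int),
      ((ans.length : Int) + fuel = t) →
      (∀ j : Nat, j < fuel → 0 ≤ p' - 1 + (j : Int) * mI ∧ p' - 1 + (j : Int) * mI < temp.length) →
      loopA t mI temp fuel ans p' =
        ans ++ (List.range fuel).map (fun (j : Nat) => temp.getD (p' - 1 + (j : Int) * mI).toNat ' ') := by
  intro fuel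
  induction fuel with
  | zero => intro ans p' h1 h2; simp [loopA]
  | succ f ih =>
    intro ans p' h1 h2
    have hlt : (ans.length : Int) < t := by omega
    obtain ⟨hb0, hb1⟩ := h2 0 (by omega)
    simp only [Nat.cast_zero, zero_mul, add_zero] at hb0 hb1
    have hk : p' - 1 = ((p' - 1).toNat : Int) := by omega
    have hkl : (p' - 1).toNat < temp.length := by omega
    have hg : PySem.List.pyGet? temp (p' - 1) = some (temp[(p' - 1).toNat]) := by
      conv_lhs => rw [hk]
      rw [PySem.List.pyGet?_natCast, List.getElem?_eq_getElem hkl]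
    rw [loopA, if_pos hlt]
    simp only [hg]
    rw [ih (ans ++ [temp[(p' - 1).toNat]]) (p' + mI) (by simp; omega)
        (by intro j hj
            have := h2 (j+1) (by omega)
            push_cast at this ⊢
            constructor <;> [skip; skip] <;> [linarith [this.1]; linarith [this.2]])]
    rw [List.range_succ_eq_map]
    simp only [List.map_cons, List.map_map]
    rw [List.append_assoc]
    congr 1
    · simp only [Nat.cast_zero, zero_mul, add_zero, List.singleton_append]
      congr 1
      · rw [List.getD_eq_getElem?_getD, List.getElem?_eq_getElem hkl]; rfl
      · apply List.map_congr_left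
        intro j hj
        simp only [Function.comp]
        congr 2
        push_cast
        ring

-- the subsequence B's position filter selects from a digit stream
def selB (mI target : Int) : Int → List Char → List Char
  | _, [] => []
  | pos, c :: L =>
    if PySem.Int.mod pos mI = target then c :: selB mI target (pos + 1) L
    else selB mI target (pos + 1) L

lemma foldl_stepB (t mI target : Int) : ∀ (L : List Char) (pos : Int) (ans : List Char),
    L.foldl (stepB t mI target) (pos, ans) =
      (pos + L.length, ans ++ (selB mI target pos L).take (t.toNat - ans.length)) := by
  intro L
  induction L with
  | nil => intro pos ans; simp [selB]
  | cons c L ih =>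
    intro pos ans
    rw [List.foldl_cons, selB]
    by_cases hm : PySem.Int.mod pos mI = target
    · by_cases hl : (ans.length : Int) < t
      · have hstep : stepB t mI target (pos, ans) c = (pos + 1, ans ++ [c]) := by
          simp [stepB, hl, hm]
        rw [hstep, ih]
        have hn : t.toNat - ans.length = (t.toNat - (ans.length + 1)) + 1 := by omega
        simp only [if_pos hm]
        rw [hn, List.take_succ_cons]
        simp [List.append_assoc]
        omega
      · have hstep : stepB t mI target (pos, ans) c = (pos + 1, ans) := by
          simp [stepB, hl]
        rw [hstep, ih]
        have hn : t.toNat - ans.length = 0 := by omega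
        simp [hn, if_pos hm]
        omega
    · have hstep : stepB t mI target (pos, ans) c = (pos + 1, ans) := by
        simp [stepB, hm]
      rw [hstep, ih]
      simp [if_neg hm]
      omega

lemma selB_append (mI target : Int) : ∀ (A B : List Char) (pos : Int),
    selB mI target pos (A ++ B) = selB mI target pos A ++ selB mI target (pos + A.length) B := by
  intro A
  induction A with
  | nil => intro B pos; simp [selB]
  | cons c A ih =>
    intro B pos
    simp only [List.cons_append, selB]
    by_cases hm : PySem.Int.mod pos mI = target <;>
      simp [hm, ih, add_comm, add_left_comm]

-- countdown form of the selector: element j sits at stream index d + j*M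
def selN (M : Nat) : Nat → List Char → List Char
  | _, [] => []
  | 0, c :: L => c :: selN M (M - 1) L
  | d+1, _ :: L => selN M d L

lemma selN_getElem? (M : Nat) (hM : 0 < M) : ∀ (L : List Char) (d j : Nat),
    (selN M d L)[j]? = L[d + j * M]? := by
  intro L
  induction L with
  | nil => intro d j; simp [selN]
  | cons c L ih =>
    intro d j
    cases d with
    | zero =>
      cases j with
      | zero => simp [selN]
      | succ j =>
        rw [selN]
        simp only [List.getElem?_cons_succ, ih]
        have h : 0 + (j + 1) * M = (M - 1 + j * M) + 1 := by
          have := hM; ring_nf; omega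
        rw [h, List.getElem?_cons_succ]
    | succ d =>
      rw [selN, ih]
      have h : d + 1 + j * M = (d + j * M) + 1 := by ring
      rw [h, List.getElem?_cons_succ]

lemma mod_succ_eval (M pos : Nat) (hM : 0 < M) :
    (pos + 1) % M = if pos % M + 1 = M then 0 else pos % M + 1 := by
  have h1 : (pos + 1) % M = (pos % M + 1) % M := by
    conv_lhs => rw [← Nat.mod_add_mod]
  have hr : pos % M < M := Nat.mod_lt _ hM
  rw [h1]
  split
  · next h => rw [h, Nat.mod_self]
  · next h => exact Nat.mod_eq_of_lt (by omega)

lemma mod_dist_eval (M tg r : Nat) (htg : tg < M) (hr : r < M) :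
    (tg + M - r) % M = if r ≤ tg then tg - r else tg + M - r := by
  split
  · next h =>
    rw [Nat.mod_eq_sub_mod (by omega)]
    have h2 : tg + M - r - M = tg - r := by omega
    rw [h2, Nat.mod_eq_of_lt (by omega)]
  · next h => exact Nat.mod_eq_of_lt (by omega)

-- how the countdown (tg + M - pos % M) % M evolves as pos steps by one
lemma dstep (M tg pos : Nat) (hM : 0 < M) (htg : tg < M) :
    ((tg + M - pos % M) % M = 0 ↔ pos % M = tg)
  ∧ (pos % M = tg → (tg + M - (pos + 1) % M) % M = M - 1)
  ∧ (pos % M ≠ tg → (tg + M - (pos + 1) % M) % M = (tg + M - pos % M) % M - 1) := by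
  have hr : pos % M < M := Nat.mod_lt _ hM
  have h3 := mod_dist_eval M tg (pos % M) htg hr
  have h2 := mod_succ_eval M pos hM
  by_cases hc : pos % M + 1 = M
  · rw [if_pos hc] at h2
    rw [h2, mod_dist_eval M tg 0 htg hM]
    split at h3 <;> (simp only [Nat.zero_le, if_true, Nat.sub_zero]; omega)
  · rw [if_neg hc] at h2
    rw [h2, mod_dist_eval M tg (pos % M + 1) htg (by omega)]
    split at h3 <;> split <;> omega

lemma selB_eq_selN (M tg : Nat) (hM : 0 < M) (htg : tg < M) : ∀ (L : List Char) (pos : Nat),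
    selB (M : Int) (tg : Int) (pos : Int) L = selN M ((tg + M - pos % M) % M) L := by
  intro L
  induction L with
  | nil => intro pos; simp [selB, selN]
  | cons c L ih =>
    intro pos
    obtain ⟨hz, hs1, hs2⟩ := dstep M tg pos hM htg
    have hmodc : PySem.Int.mod (pos : Int) (M : Int) = ((pos % M : Nat) : Int) :=
      PySem.Int.mod_natCast pos M
    have hcast1 : ((pos : Int) + 1) = ((pos + 1 : Nat) : Int) := by push_cast; ring
    rw [selB, hmodc, hcast1, ih (pos + 1)]
    by_cases he : pos % M = tg
    · rw [if_pos (by exact_mod_cast congrArg (Nat.cast : Nat → Int) he)]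
      rw [hs1 he, hz.mpr he, selN]
    · rw [if_neg (by exact_mod_cast he), hs2 he]
      have hdpos : 0 < (tg + M - pos % M) % M := by
        rcases Nat.eq_zero_or_pos ((tg + M - pos % M) % M) with h | h
        · exact absurd (hz.mp h) he
        · exact h
      obtain ⟨e, hde⟩ : ∃ e, (tg + M - pos % M) % M = e + 1 :=
        ⟨(tg + M - pos % M) % M - 1, by omega⟩
      rw [hde]
      have h1 : e + 1 - 1 = e := by omega
      rw [h1, selN]

lemma length_flatMap_ge (g : Int → List Char) : ∀ (l : List Int),
    (∀ i ∈ l, g i ≠ []) → l.length ≤ (l.flatMap g).length := by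
  intro l
  induction l with
  | nil => simp
  | cons a l ih =>
    intro h
    have ha : g a ≠ [] := h a (by simp)
    have hl : l.length ≤ (l.flatMap g).length := ih (fun i hi => h i (by simp [hi]))
    have h1 : 1 ≤ (g a).length := by
      cases hga : g a with
      | nil => exact absurd hga ha
      | cons x xs => simp
    rw [List.flatMap_cons, List.length_cons, List.length_append]
    omega

-- the digit stream of numbers 0..i-1, and B's answer after i fully processed numbers
def TkG (n : Int) (i : Nat) : List Char :=
  (PySem.List.pyRange 0 (i : Int) 1).flatMap (fun x => convA (x.toNat + 1) x n)

def ansFG (n t mI target : Int) (i : Nat) : List Char :=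
  (selB mI target 0 (TkG n i)).take t.toNat

lemma TkG_succ (n : Int) (i : Nat) :
    TkG n (i + 1) = TkG n i ++ convA (i + 1) (i : Int) n := by
  unfold TkG
  have hc : ((i + 1 : Nat) : Int) = (i : Int) + 1 := by push_cast; ring
  rw [hc, PySem.List.pyRange_one_succ_right (by positivity), List.flatMap_append]
  simp

-- running B's outer loop from the state after i numbers lands on the state after i + fuel
lemma outerB_run (n t mI target : Int) (ht : 0 ≤ t) : ∀ (fuel i : Nat),
    outerB n t mI target fuel (i : Int) ((TkG n i).length : Int) (ansFG n t mI target i) =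
      ansFG n t mI target (i + fuel) := by
  intro fuel
  induction fuel with
  | zero => intro i; simp [outerB]
  | succ f ih =>
    intro i
    have hfold : ∀ j : Nat, (TkG n j).foldl (stepB t mI target) (0, []) =
        (((TkG n j).length : Int), ansFG n t mI target j) := by
      intro j
      rw [foldl_stepB]
      simp [ansFG]
    rw [outerB]
    by_cases hfull : ((ansFG n t mI target i).length : Int) < t
    · rw [if_pos hfull]
      have hds : (digsB ((i : Int).toNat + 1) (i : Int) n []).reverse = convA (i + 1) (i : Int) n := by
        rw [digsB_eq_convA]
        simp
      rw [hds]
      have hst : (convA (i + 1) (i : Int) n).foldl (stepB t mI target)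
          (((TkG n i).length : Int), ansFG n t mI target i) =
          (((TkG n (i + 1)).length : Int), ansFG n t mI target (i + 1)) := by
        rw [← hfold i, ← List.foldl_append, ← TkG_succ, hfold (i + 1)]
      rw [hst]
      have hc : (i : Int) + 1 = ((i + 1 : Nat) : Int) := by push_cast; ring
      rw [hc, ih (i + 1)]
      congr 1
      omega
    · rw [if_neg hfull]
      -- answer already holds t characters: later numbers only extend the stream
      have hlen : (ansFG n t mI target i).length = t.toNat := by
        have := List.length_take_le t.toNat (selB mI target 0 (TkG n i))
        unfold ansFG at *
        omega
      have hsel : t.toNat ≤ (selB mI target 0 (TkG n i)).length := by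
        have h1 : (List.take t.toNat (selB mI target 0 (TkG n i))).length =
            min t.toNat (selB mI target 0 (TkG n i)).length := List.length_take
        unfold ansFG at hlen
        omega
      have hsplit : TkG n (i + f + 1) = TkG n i ++
          ((PySem.List.pyRange (i : Int) ((i + f + 1 : Nat) : Int) 1).flatMap
            (fun x => convA (x.toNat + 1) x n)) := by
        unfold TkG
        rw [PySem.List.pyRange_one_append 0 (i : Int) ((i + f + 1 : Nat) : Int)
          (by positivity) (by push_cast; omega), List.flatMap_append]
      unfold ansFG
      have hfix : i + (f + 1) = i + f + 1 := by omega
      rw [hfix, hsplit, selB_append, List.take_append_of_le_length hsel]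

-- main-branch equality: both sides are the strided selection from the same digit stream
lemma main_eq (n t m p : Int) (h2 : 2 ≤ n) (h16 : n ≤ 16) (ht : 1 ≤ t) (hm : 1 ≤ m)
    (hp1 : 1 ≤ p) (hpm : p ≤ m) : solution n t m p = solution_alt n t m p := by
  have hM0 : 0 < m.toNat := by omega
  have hmc : (m.toNat : Int) = m := by omega
  have htc : (t.toNat : Int) = t := by omega
  have htgc : ((p - 1).toNat : Int) = p - 1 := by omega
  have htgM : (p - 1).toNat < m.toNat := by omega
  have hKc : ((m * t).toNat : Int) = m * t := by
    have : 0 ≤ m * t := by positivity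
    omega
  have hKmul : (m * t).toNat = m.toNat * t.toNat := by
    have : ((m.toNat * t.toNat : Nat) : Int) = m * t := by push_cast [hmc, htc]; ring
    omega
  -- the stream: temp = TkG n (m*t).toNat, of length ≥ (m*t).toNat
  have htemp : (PySem.List.pyRange 0 (m * t) 1).foldl
      (fun acc i => acc ++ convA (i.toNat + 1) i n) [] = TkG n (m * t).toNat := by
    rw [PySem.List.foldl_append_eq_flatMap, TkG, hKc]
    rfl
  have htlen : (m * t).toNat ≤ (TkG n (m * t).toNat).length := by
    have hlen := length_flatMap_ge (fun x => convA (x.toNat + 1) x n)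
      (PySem.List.pyRange 0 ((m * t).toNat : Int) 1)
      (fun i hi => convA_ne_nil i.toNat i n h2 h16)
    rw [TkG]
    have hfix : ((((m * t).toNat : Nat) : Int) - 0).toNat = (m * t).toNat := by omega
    rw [PySem.List.length_pyRange_one, hfix] at hlen
    exact hlen
  have hidx : ∀ j : Nat, j < t.toNat → (p - 1).toNat + j * m.toNat < (TkG n (m * t).toNat).length := by
    intro j hj
    have h1 : j * m.toNat ≤ (t.toNat - 1) * m.toNat := Nat.mul_le_mul_right _ (by omega)
    have h2' : t.toNat * m.toNat = (t.toNat - 1) * m.toNat + m.toNat := by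
      conv_lhs => rw [← Nat.succ_pred_eq_of_pos (show 0 < t.toNat by omega)]
      rw [Nat.succ_mul]
      rfl
    have hfin : (p - 1).toNat + j * m.toNat < t.toNat * m.toNat :=
      calc (p - 1).toNat + j * m.toNat < m.toNat + j * m.toNat := by
              exact Nat.add_lt_add_right htgM _
        _ ≤ m.toNat + (t.toNat - 1) * m.toNat := Nat.add_le_add_left h1 _
        _ = t.toNat * m.toNat := (Nat.add_comm _ _).trans h2'.symm
    have hcm : t.toNat * m.toNat = (m * t).toNat := by rw [hKmul, Nat.mul_comm]
    omega
  -- B's target is p - 1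
  have htarget : PySem.Int.mod (p - 1) m = ((p - 1).toNat : Int) := by
    rw [PySem.Int.mod_eq_emod_of_pos (by omega), Int.emod_eq_of_lt (by omega) (by omega), htgc]
  -- run B
  have hB : outerB n t m ((( p - 1).toNat : Nat) : Int) (m * t).toNat 0 0 [] =
      ansFG n t m (((p - 1).toNat : Nat) : Int) (m * t).toNat := by
    have h0 := outerB_run n t m (((p - 1).toNat : Nat) : Int) (by omega) (m * t).toNat 0
    simp only [TkG, ansFG] at h0 ⊢
    have hnil : PySem.List.pyRange 0 ((0 : Nat) : Int) 1 = [] :=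
      PySem.List.pyRange_one_eq_nil (by simp)
    rw [hnil] at h0
    simpa [selB] using h0
  -- run A
  have hA : loopA t m (TkG n (m * t).toNat) t.toNat [] p =
      (List.range t.toNat).map
        (fun (j : Nat) => (TkG n (m * t).toNat).getD (p - 1 + (j : Int) * m).toNat ' ') := by
    have := loopA_spec t m (TkG n (m * t).toNat) t.toNat [] p (by simp [htc])
      (by intro j hj
          have hjm : 0 ≤ (j : Int) * m := by positivity
          have hcast : p - 1 + (j : Int) * m = (((p - 1).toNat + j * m.toNat : Nat) : Int) := by
            push_cast [htgc, hmc]; ring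
          have hub := hidx j hj
          constructor
          · omega
          · rw [hcast]; exact_mod_cast hub)
    simpa using this
  -- assemble
  have hNA : (m * t).natAbs = (m * t).toNat := by omega
  simp only [solution, solution_alt]
  rw [htemp, hA, htarget, hNA, hB]
  congr 1
  -- both lists have the same j-th entry: stream index (p-1).toNat + j * m.toNat
  have hsel : selB m (((p - 1).toNat : Nat) : Int) 0 (TkG n (m * t).toNat) =
      selN m.toNat ((p - 1).toNat) (TkG n (m * t).toNat) := by
    have h := selB_eq_selN m.toNat (p - 1).toNat hM0 htgM (TkG n (m * t).toNat) 0
    rw [Nat.zero_mod, mod_dist_eval m.toNat (p - 1).toNat 0 htgM hM0] at h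
    simp only [Nat.cast_zero, hmc] at h
    simpa using h
  unfold ansFG
  rw [hsel]
  apply List.ext_getElem?
  intro j
  by_cases hj : j < t.toNat
  · rw [List.getElem?_take_of_lt hj, selN_getElem? m.toNat hM0, List.getElem?_map,
      List.getElem?_range hj]
    have hub := hidx j hj
    have hcast : (p - 1 + (j : Int) * m).toNat = (p - 1).toNat + j * m.toNat := by
      have : p - 1 + (j : Int) * m = (((p - 1).toNat + j * m.toNat : Nat) : Int) := by
        push_cast [htgc, hmc]; ring
      omega
    rw [List.getElem?_eq_getElem hub]
    simp only [Option.map_some]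
    congr 1
    rw [hcast, List.getD_eq_getElem?_getD, List.getElem?_eq_getElem hub]
    rfl
  · rw [List.getElem?_eq_none, List.getElem?_eq_none]
    · have := List.length_take_le t.toNat (selN m.toNat ((p - 1).toNat) (TkG n (m * t).toNat))
      omega
    · simpa using hj

-- ===== VERDICT (by name: the statement is the Claim_ definition above) =====
theorem solution_spec : Claim_equal_solution := by
  intro n t m p hdom hpre
  unfold Spec_solution
  rcases hpre with ⟨h2, h16, ht, hm, hp1, hpm⟩ | ⟨ht, hm0, -⟩
  · exact main_eq n t m p h2 h16 ht hm hp1 hpm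
  · have h1 : t.toNat = 0 := by omega
    have hcond : ¬ ((0 : Int) < t) := by omega
    cases hf : (m * t).natAbs with
    | zero => simp [solution, solution_alt, h1, hf, loopA, outerB]
    | succ k => simp [solution, solution_alt, h1, hf, loopA, outerB, hcond]
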